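-- pv_equiv track=rewrite | github.com/AceOfKades/Algorithms | functions.py | stringToASCII
-- ===== SOURCE A (Python) =====
-- def stringToASCII(string):
--     asciiMessage = "127" # garbage character of length 3 at the start, to be removed at decryption
--     for x in string:
--         char = str(ord(x))
--         if len(char) < 3:
--             if len(char) == 1:
--                 char = "00" + char
--             elif len(char) == 2:
--                 char = "0" + char
--         asciiMessage += char
--
--     return int(asciiMessage)
-- ===== SOURCE B (Python) =====
-- def stringToASCII(string):
--     blocks = ["127"]
--     for x in string:
--         code = ord(x)
--         digits = ""
--         while code > 0 or len(digits) < 3: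
--             digits = chr(48 + code % 10) + digits
--             code //= 10
--         blocks.append(digits)
--     return int("".join(blocks))
-- ===== Notes on version B (the rewrite author's own statement) =====
-- stated objective: alternative
-- what changed: Each character's code block is produced by arithmetic digit extraction (a while loop taking code % 10 / code // 10 with a built-in minimum of three digits) collected into a list joined once, instead of str(ord(x)) with conditional zero-padding prefix branches concatenated onto an accumulator string.
import Mathlib
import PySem

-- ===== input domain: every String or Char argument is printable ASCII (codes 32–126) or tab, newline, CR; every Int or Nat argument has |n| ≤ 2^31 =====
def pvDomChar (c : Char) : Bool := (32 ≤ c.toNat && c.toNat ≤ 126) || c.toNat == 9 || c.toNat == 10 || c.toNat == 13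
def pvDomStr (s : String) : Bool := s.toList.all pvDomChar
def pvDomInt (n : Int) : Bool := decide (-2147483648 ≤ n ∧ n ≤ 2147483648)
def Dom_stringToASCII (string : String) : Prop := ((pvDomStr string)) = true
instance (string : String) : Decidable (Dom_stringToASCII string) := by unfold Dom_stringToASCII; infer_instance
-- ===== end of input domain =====

-- B emits each character's (at least three) decimal code digits by arithmetic
-- digit extraction (repeated %10 / //10) into a list joined once, instead of
-- str(ord) with conditional zero-padding prefixes concatenated onto a string.


-- ===== PORT A =====
def stringToASCII (string : String) : Int :=
  let asciiMessage :=
    string.toList.foldl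
      (fun acc x =>
        acc ++
          (let char := PySem.Int.toChars ((x.toNat : Int))   -- str(ord(x))
           if char.length < 3 then
             if char.length = 1 then '0' :: '0' :: char
             else if char.length = 2 then '0' :: char
             else char
           else char))
      ['1', '2', '7']                                        -- "127"
  -- int(asciiMessage); it never raises here (the message is a nonempty digit string), so the .getD 0 default is unreachable
  (PySem.Int.ofChars? asciiMessage).getD 0

-- ===== PORT B =====
-- the while loop 'digits = chr(48 + code % 10) + digits; code //= 10' (code = ord(x) ≥ 0,
-- so Python's % and // agree with Nat's); str values are carried as List Char, exact
def pvEmit : Nat → Nat → List Char → List Char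
  | 0, _, digits => digits                                   -- fuel guard only: never reached with the fuel below
  | fuel + 1, code, digits =>
    if 0 < code ∨ digits.length < 3 then
      pvEmit fuel (code / 10) (Char.ofNat (48 + code % 10) :: digits)
    else digits

def stringToASCII_alt (string : String) : Int :=
  let blocks :=
    string.toList.foldl
      (fun blocks x => blocks ++ [pvEmit (x.toNat + 3) x.toNat []])   -- blocks.append(digits); fuel code+3 bounds the loop's trip count
      [['1', '2', '7']]                                      -- ["127"]
  -- int("".join(blocks)); never raises here, the .getD 0 default is unreachable
  (PySem.Int.ofChars? (PySem.Chars.join [] blocks)).getD 0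

-- ===== PRECONDITION & SPEC =====
def Spec_stringToASCII (string : String) (out : Int) : Prop := out = stringToASCII_alt string
instance (string : String) (out : Int) : Decidable (Spec_stringToASCII string out) := by unfold Spec_stringToASCII; infer_instance

-- ===== CLAIM (what is proved, stated in full; the proofs are below) =====
def Claim_equal_stringToASCII : Prop := ∀ (string : String), Dom_stringToASCII string → Spec_stringToASCII string (stringToASCII string)

-- ===== LEMMAS AND PROOFS =====

-- ''.join with an empty separator is concatenation
theorem pv_join_nil_eq_flatten (L : List (List Char)) :
    PySem.Chars.join [] L = L.flatten := by
  induction L with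
  | nil => rfl
  | cons a rest ih =>
    cases rest with
    | nil => simp [PySem.Chars.join, List.intercalate]
    | cons b t =>
      simp only [PySem.Chars.join, List.intercalate, List.intersperse] at *
      simp_all

-- per character (any domain character has code ≤ 126): A's padded str(ord(x))
-- equals B's arithmetically extracted digit block
set_option maxHeartbeats 2000000 in
theorem pv_pad_eq_emit (n : Nat) (h : n ≤ 126) :
    (if (PySem.Int.toChars ((n : Int))).length < 3 then
       if (PySem.Int.toChars ((n : Int))).length = 1 then '0' :: '0' :: PySem.Int.toChars ((n : Int))
       else if (PySem.Int.toChars ((n : Int))).length = 2 then '0' :: PySem.Int.toChars ((n : Int))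
       else PySem.Int.toChars ((n : Int))
     else PySem.Int.toChars ((n : Int)))
    = pvEmit (n + 3) n [] := by
  have H : ∀ m : Fin 127,
      (if (PySem.Int.toChars (((m : Nat) : Int))).length < 3 then
         if (PySem.Int.toChars (((m : Nat) : Int))).length = 1 then
           '0' :: '0' :: PySem.Int.toChars (((m : Nat) : Int))
         else if (PySem.Int.toChars (((m : Nat) : Int))).length = 2 then
           '0' :: PySem.Int.toChars (((m : Nat) : Int))
         else PySem.Int.toChars (((m : Nat) : Int))
       else PySem.Int.toChars (((m : Nat) : Int)))
      = pvEmit ((m : Nat) + 3) (m : Nat) [] := by decide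
  exact H ⟨n, by omega⟩

-- A's padded pieces, concatenated, equal the flattened emit blocks (codes ≤ 126)
theorem pv_flat (l : List Char) (h : ∀ x ∈ l, x.toNat ≤ 126) :
    List.flatMap
        (fun x =>
          if (PySem.Int.toChars ((x.toNat : Int))).length < 3 then
            if (PySem.Int.toChars ((x.toNat : Int))).length = 1 then
              '0' :: '0' :: PySem.Int.toChars ((x.toNat : Int))
            else if (PySem.Int.toChars ((x.toNat : Int))).length = 2 then
              '0' :: PySem.Int.toChars ((x.toNat : Int))
            else PySem.Int.toChars ((x.toNat : Int))
          else PySem.Int.toChars ((x.toNat : Int))) l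
    = (l.map (fun x => pvEmit (x.toNat + 3) x.toNat [])).flatten := by
  induction l with
  | nil => simp
  | cons a t ih =>
    simp only [List.flatMap_cons, List.map_cons, List.flatten_cons]
    rw [ih (fun x hx => h x (List.mem_cons_of_mem _ hx))]
    rw [pv_pad_eq_emit a.toNat (h a (List.mem_cons_self ..))]

-- ===== VERDICT (by name: the statement is the Claim_ definition above) =====
theorem stringToASCII_spec : Claim_equal_stringToASCII := by
  intro s hdom
  unfold Spec_stringToASCII stringToASCII stringToASCII_alt
  -- both sides parse a digit message with int(); show the two messages are equal
  refine congrArg (fun l => (PySem.Int.ofChars? l).getD 0) ?_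
  rw [PySem.List.foldl_append_eq_flatMap, PySem.List.foldl_append_singleton_eq_map,
      pv_join_nil_eq_flatten]
  have hall : ∀ x ∈ s.toList, x.toNat ≤ 126 := by
    intro x hx
    have hx' := List.all_eq_true.mp hdom x hx
    simp only [pvDomChar, Bool.or_eq_true, Bool.and_eq_true, decide_eq_true_eq, beq_iff_eq] at hx'
    omega
  rw [pv_flat s.toList hall]
  simp
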